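-- pv_equiv track=rewrite | github.com/Akeneus/sequence-assembler | sequence_assembler_substitution.py | _checkSequenceSubst
-- ===== SOURCE A (Python) =====
-- import math
--
-- def _checkSequenceSubst(stringA:str, stringB:str) -> int:
--     stringLengA = len(stringA)
--     stringLengB = len(stringB)
--     v = 0
--     maxFehlerQuoat = _getMaxErrors(max(stringLengA,stringLengB))
--     for i in range(stringLengA):
--         tmp = stringA[i:stringLengA]
--         editDistanz = _getEditDistanze(stringB, tmp)
--         if(editDistanz <= maxFehlerQuoat):
--             return len(tmp)
--     return v
--
-- def _getMaxErrors(stringLen:int):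
--     return math.floor(stringLen / 10)+1
--
-- def _getEditDistanze(stringB, tmp):
--     edit = 0
--     tmpString = stringB[0:len(tmp)]
--     for i in range(len(tmpString)):
--         if(tmpString[i] != tmp[i]):
--             edit += 1
--     return edit
-- ===== SOURCE B (Python) =====
-- def _checkSequenceSubst(stringA: str, stringB: str) -> int:
--     n, m = len(stringA), len(stringB)
--     threshold = max(n, m) // 10 + 1
--     # index of stringB: character -> list of positions
--     positions = {}
--     for j, c in enumerate(stringB):
--         positions.setdefault(c, []).append(j)
--     # sparse correlation: matches[off] = number of aligned equal characters
--     # when stringA's suffix starting at off is laid over stringB's prefix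
--     matches = [0] * n
--     for i, c in enumerate(stringA):
--         for j in positions.get(c, []):
--             if i - j >= 0:
--                 matches[i - j] += 1
--     # first offset whose mismatch count (overlap minus matches) is within threshold
--     for off in range(n):
--         overlap = min(n - off, m)
--         if overlap - matches[off] <= threshold:
--             return n - off
--     return 0
-- ===== Notes on version B (the rewrite author's own statement) =====
-- stated objective: faster
-- what changed: B builds a char-to-positions index of stringB once and fills a match-count array for all offsets in a single sparse correlation pass (one increment per equal character pair), then scans for the first offset whose mismatch count (overlap minus matches) is within the threshold, instead of A's re-counting mismatches of every suffix against B's prefix.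
import Mathlib
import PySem

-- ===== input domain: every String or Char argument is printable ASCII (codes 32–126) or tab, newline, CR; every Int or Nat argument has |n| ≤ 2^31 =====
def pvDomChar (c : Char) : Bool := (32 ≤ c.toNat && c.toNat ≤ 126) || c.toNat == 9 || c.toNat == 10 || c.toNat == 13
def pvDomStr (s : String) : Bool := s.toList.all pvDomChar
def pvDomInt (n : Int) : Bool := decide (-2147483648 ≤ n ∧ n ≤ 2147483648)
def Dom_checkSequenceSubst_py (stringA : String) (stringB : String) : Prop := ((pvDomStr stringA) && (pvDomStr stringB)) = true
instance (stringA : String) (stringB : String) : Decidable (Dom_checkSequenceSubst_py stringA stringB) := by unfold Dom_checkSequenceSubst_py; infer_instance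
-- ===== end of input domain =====

-- B replaces A's per-suffix mismatch recount by one sparse correlation pass: a char→positions
-- index of stringB yields aligned-match counts for ALL offsets at once, then a single scan
-- finds the first offset whose mismatch count (overlap − matches) is within the threshold.

-- ===== PORT A =====
-- math.floor(stringLen / 10) + 1; for the nonnegative int lengths arising here the float
-- division is exact, so floor division is the exact port.
def pvGetMaxErrors (stringLen : Int) : Int := PySem.Int.floordiv stringLen 10 + 1

-- _getEditDistanze: tmpString = stringB[0:len(tmp)]; count index positions that differ.
def pvGetEditDistanze (stringB tmp : List Char) : Int :=
  let tmpString := PySem.List.slice stringB (some 0) (some (tmp.length : Int))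
  (PySem.List.pyRange 0 (tmpString.length : Int) 1).foldl
    (fun edit i =>
      if PySem.List.pyGetD tmpString i ' ' ≠ PySem.List.pyGetD tmp i ' ' then edit + 1 else edit) 0

-- the 'for i in range(stringLengA)' loop with its early return
def pvALoop (a b : List Char) (maxF : Int) : List Int → Int
  | [] => 0
  | i :: rest =>
      let tmp := PySem.List.slice a (some i) (some (a.length : Int))
      if pvGetEditDistanze b tmp ≤ maxF then (tmp.length : Int)
      else pvALoop a b maxF rest

def checkSequenceSubst_py (stringA : String) (stringB : String) : Int :=
  let a := stringA.toList
  let b := stringB.toList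
  let maxF := pvGetMaxErrors (max (a.length : Int) (b.length : Int))
  pvALoop a b maxF (PySem.List.pyRange 0 (a.length : Int) 1)

-- ===== PORT B =====
-- positions.setdefault(c, []).append(j) over enumerate(stringB): exactly Dict.modify c [] (· ++ [j])
def pvPositions (b : List Char) : PySem.Dict Char (List Int) :=
  ((PySem.List.enumerate b).map (fun p => (p.2, p.1))).foldl
    (fun d p => d.modify p.1 [] (fun l => l ++ [p.2])) PySem.Dict.empty

-- the inner 'for j in positions.get(c, []): if i - j >= 0: matches[i - j] += 1' body
def pvStep (i : Int) (mt : List Int) (j : Int) : List Int :=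
  if 0 ≤ i - j then mt.set (i - j).toNat (mt.getD (i - j).toNat 0 + 1) else mt

-- matches = [0] * n, filled by the double loop over enumerate(stringA) and the index lists
def pvMatches (a b : List Char) : List Int :=
  (PySem.List.enumerate a).foldl
    (fun mt p => ((pvPositions b).getD p.2 []).foldl (pvStep p.1) mt)
    (List.replicate a.length 0)

-- the final 'for off in range(n)' scan with its early return
def pvBScan (n m t : Int) (mt : List Int) : List Int → Int
  | [] => 0
  | off :: rest =>
      if min (n - off) m - mt.getD off.toNat 0 ≤ t then n - off
      else pvBScan n m t mt rest

def checkSequenceSubst_py_alt (stringA : String) (stringB : String) : Int :=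
  let a := stringA.toList
  let b := stringB.toList
  let n : Int := (a.length : Int)
  let m : Int := (b.length : Int)
  let t := PySem.Int.floordiv (max n m) 10 + 1
  pvBScan n m t (pvMatches a b) (PySem.List.pyRange 0 n 1)

-- ===== PRECONDITION & SPEC =====
def Spec_checkSequenceSubst_py (stringA : String) (stringB : String) (out : Int) : Prop := out = checkSequenceSubst_py_alt stringA stringB
instance (stringA : String) (stringB : String) (out : Int) : Decidable (Spec_checkSequenceSubst_py stringA stringB out) := by unfold Spec_checkSequenceSubst_py; infer_instance

-- ===== CLAIM (what is proved, stated in full; the proofs are below) =====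
def Claim_equal_checkSequenceSubst_py : Prop := ∀ (stringA : String) (stringB : String), Dom_checkSequenceSubst_py stringA stringB → Spec_checkSequenceSubst_py stringA stringB (checkSequenceSubst_py stringA stringB)

-- ===== LEMMAS AND PROOFS =====

-- mismatch / match counts of the aligned zipped prefix
def pvMM : List Char → List Char → Nat
  | x :: xs, y :: ys => (if x = y then 0 else 1) + pvMM xs ys
  | _, _ => 0

def pvMC : List Char → List Char → Nat
  | x :: xs, y :: ys => (if x = y then 1 else 0) + pvMC xs ys
  | _, _ => 0

theorem pvMM_countP (u v : List Char) (d : Char) :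
    pvMM u v = List.countP (fun k => decide (¬ v.getD k d = u.getD k d))
      (List.range (min u.length v.length)) := by
  induction u generalizing v with
  | nil => simp [pvMM]
  | cons x xs ih =>
    cases v with
    | nil => simp [pvMM]
    | cons y ys =>
      have hmin : min (x :: xs).length (y :: ys).length = (min xs.length ys.length) + 1 := by
        simp [Nat.succ_min_succ]
      rw [hmin, List.range_succ_eq_map, List.countP_cons, List.countP_map]
      have : (fun k => decide (¬ (y :: ys).getD k d = (x :: xs).getD k d)) ∘ Nat.succ
          = fun k => decide (¬ ys.getD k d = xs.getD k d) := by
        funext k; simp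
      rw [this, ← ih ys]
      by_cases h : x = y
      · simp [pvMM, h]
      · simp [pvMM, h, eq_comm]
        omega

theorem pvEdit_eq_mm (b tmp : List Char) :
    pvGetEditDistanze b tmp = (pvMM tmp b : Nat) := by
  unfold pvGetEditDistanze
  rw [PySem.List.slice_zero_start, PySem.List.slice_to_natCast]
  have hlen : (b.take tmp.length).length = min tmp.length b.length := by simp
  rw [PySem.List.foldl_ite_add_one, hlen, PySem.List.pyRange_zero_natCast, List.countP_map]
  have hcongr : List.countP
      ((fun i => decide (¬ PySem.List.pyGetD (b.take tmp.length) i ' ' = PySem.List.pyGetD tmp i ' ')) ∘ (fun n : Nat => (n : Int)))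
      (List.range (min tmp.length b.length))
      = List.countP (fun k => decide (¬ b.getD k ' ' = tmp.getD k ' '))
        (List.range (min tmp.length b.length)) := by
    apply List.countP_congr
    intro k hk
    have hk' : k < min tmp.length b.length := List.mem_range.mp hk
    have h2 : k < tmp.length := lt_of_lt_of_le hk' (min_le_left _ _)
    have ht : (b.take tmp.length)[k]? = b[k]? := by
      simp [h2]
    simp [Function.comp, PySem.List.pyGetD_natCast, ht]
  rw [hcongr, pvMM_countP tmp b ' ']
  simp

theorem pvMC_countP (u v : List Char) (d : Char) :
    pvMC u v = List.countP (fun k => decide (v.getD k d = u.getD k d))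
      (List.range (min u.length v.length)) := by
  induction u generalizing v with
  | nil => simp [pvMC]
  | cons x xs ih =>
    cases v with
    | nil => simp [pvMC]
    | cons y ys =>
      have hmin : min (x :: xs).length (y :: ys).length = (min xs.length ys.length) + 1 := by
        simp [Nat.succ_min_succ]
      rw [hmin, List.range_succ_eq_map, List.countP_cons, List.countP_map]
      have : (fun k => decide ((y :: ys).getD k d = (x :: xs).getD k d)) ∘ Nat.succ
          = fun k => decide (ys.getD k d = xs.getD k d) := by
        funext k; simp
      rw [this, ← ih ys]
      by_cases h : x = y
      · simp [pvMC, h]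
        omega
      · simp [pvMC, h, eq_comm]

theorem pvMM_add_pvMC (u v : List Char) :
    pvMM u v + pvMC u v = min u.length v.length := by
  induction u generalizing v with
  | nil => simp [pvMM, pvMC]
  | cons x xs ih =>
    cases v with
    | nil => simp [pvMM, pvMC]
    | cons y ys =>
      have := ih ys
      by_cases h : x = y <;> simp [pvMM, pvMC, h, Nat.succ_min_succ] <;> omega

-- the character index of stringB: positions.get(c, []) is the list of indices j with b[j] = c
theorem posB_getD (b : List Char) (c : Char) :
    (pvPositions b).getD c []
      = (PySem.List.pyRange 0 (b.length : Int) 1).filter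
          (fun j => PySem.List.pyGetD b j ' ' == c) := by
  unfold pvPositions
  rw [PySem.Dict.getD_foldl_modify_append]
  rw [PySem.List.enumerate_eq_map_pyRange b ' ']
  simp [List.filter_map, List.map_map, Function.comp_def, PySem.Dict.getD_empty]

theorem posB_nonneg (b : List Char) (c : Char) :
    ∀ j ∈ (pvPositions b).getD c [], 0 ≤ j := by
  intro j hj
  rw [posB_getD] at hj
  have := (List.mem_filter.mp hj).1
  exact (PySem.List.mem_pyRange_one.mp this).1

theorem posB_count (b : List Char) (c : Char) (x : Int) :
    ((pvPositions b).getD c []).count x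
      = if 0 ≤ x ∧ x < (b.length : Int) ∧ PySem.List.pyGetD b x ' ' = c then 1 else 0 := by
  rw [posB_getD]
  have hnd : ((PySem.List.pyRange 0 (b.length : Int) 1).filter
      (fun j => PySem.List.pyGetD b j ' ' == c)).Nodup :=
    (PySem.List.nodup_pyRange_one 0 _).filter _
  by_cases hx : x ∈ (PySem.List.pyRange 0 (b.length : Int) 1).filter
      (fun j => PySem.List.pyGetD b j ' ' == c)
  · rw [List.count_eq_one_of_mem hnd hx]
    obtain ⟨hmem, hpred⟩ := List.mem_filter.mp hx
    obtain ⟨h0, h1⟩ := PySem.List.mem_pyRange_one.mp hmem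
    simp only [beq_iff_eq] at hpred
    rw [if_pos ⟨h0, h1, hpred⟩]
  · rw [List.count_eq_zero_of_not_mem hx]
    rw [if_neg]
    intro ⟨h0, h1, h2⟩
    exact hx (List.mem_filter.mpr ⟨PySem.List.mem_pyRange_one.mpr ⟨h0, h1⟩, by simpa using h2⟩)

theorem getD_set_int (mt : List Int) (idx k : Nat) (v : Int) (hk : k < mt.length) :
    (mt.set idx v).getD k 0 = if idx = k then v else mt.getD k 0 := by
  simp only [List.getD, List.getElem?_set]
  split_ifs with h1 h2 <;> simp_all

-- the inner loop adds, at each slot k, the number of occurrences of i - k in the index list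
theorem pvStep_fold (i : Int) : ∀ (L : List Int) (mt : List Int),
    (∀ j ∈ L, 0 ≤ j) →
    (L.foldl (pvStep i) mt).length = mt.length ∧
    (∀ k : Nat, k < mt.length →
      (L.foldl (pvStep i) mt).getD k 0 = mt.getD k 0 + (L.count ((i : Int) - k) : Int)) := by
  intro L
  induction L with
  | nil => intro mt _; simp
  | cons j rest ih =>
    intro mt hnn
    have hj : 0 ≤ j := hnn j (List.mem_cons_self)
    have hlen' : (pvStep i mt j).length = mt.length := by
      unfold pvStep; split <;> simp
    obtain ⟨hl, hk⟩ := ih (pvStep i mt j) (fun x hx => hnn x (List.mem_cons_of_mem _ hx))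
    refine ⟨by simpa [hlen'] using hl, fun k hklt => ?_⟩
    have hstep : (pvStep i mt j).getD k 0
        = mt.getD k 0 + (if i - (k : Int) = j then 1 else 0) := by
      unfold pvStep
      by_cases hpos : 0 ≤ i - j
      · rw [if_pos hpos, getD_set_int mt _ k _ hklt]
        by_cases heq : (i - j).toNat = k
        · have : i - (k : Int) = j := by omega
          rw [if_pos heq, if_pos this, heq]
        · have : ¬ i - (k : Int) = j := by omega
          rw [if_neg heq, if_neg this]
          ring
      · rw [if_neg hpos]
        have : ¬ i - (k : Int) = j := by omega
        rw [if_neg this]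
        ring
    have hcount : ((j :: rest).count ((i : Int) - (k : Int)) : Int)
        = (rest.count ((i : Int) - (k : Int)) : Int) + (if i - (k : Int) = j then 1 else 0) := by
      rw [List.count_cons]
      push_cast
      by_cases hc : (i : Int) - (k : Int) = j
      · simp [hc]
      · simp [hc]
        omega
    rw [List.foldl_cons, hk k (by omega : k < (pvStep i mt j).length), hstep, hcount]
    ring

-- the outer loop sums the inner contributions
theorem pvMatches_fold (b : List Char) : ∀ (ps : List (Int × Char)) (mt : List Int),
    (ps.foldl (fun mt p => ((pvPositions b).getD p.2 []).foldl (pvStep p.1) mt) mt).length = mt.length ∧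
    (∀ k : Nat, k < mt.length →
      (ps.foldl (fun mt p => ((pvPositions b).getD p.2 []).foldl (pvStep p.1) mt) mt).getD k 0
        = mt.getD k 0
          + (ps.map (fun p => (((pvPositions b).getD p.2 []).count (p.1 - (k : Int)) : Int))).sum) := by
  intro ps
  induction ps with
  | nil => intro mt; simp
  | cons p rest ih =>
    intro mt
    obtain ⟨hl1, hk1⟩ := pvStep_fold p.1 ((pvPositions b).getD p.2 []) mt (posB_nonneg b p.2)
    obtain ⟨hl2, hk2⟩ := ih (((pvPositions b).getD p.2 []).foldl (pvStep p.1) mt)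
    refine ⟨by simpa [hl1] using hl2, fun k hklt => ?_⟩
    rw [List.foldl_cons, hk2 k (by omega), hk1 k hklt, List.map_cons, List.sum_cons]
    ring

-- truncating a bounded range: countP with a '< M' conjunct is countP over range (min N M)
theorem countP_range_and_lt (N M : Nat) (q : Nat → Bool) :
    List.countP (fun j => decide (j < M) && q j) (List.range N)
      = List.countP q (List.range (min N M)) := by
  rcases le_total N M with h | h
  · rw [min_eq_left h]
    apply List.countP_congr
    intro j hj
    have : j < M := lt_of_lt_of_le (List.mem_range.mp hj) h
    simp [this]
  · rw [min_eq_right h]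
    have : N = M + (N - M) := by omega
    rw [this, List.range_add, List.countP_append, List.countP_map]
    have h2 : List.countP ((fun j => decide (j < M) && q j) ∘ (fun x => M + x)) (List.range (N - M)) = 0 := by
      apply List.countP_eq_zero.mpr
      intro j _
      have hM : ¬ (M + j < M) := by omega
      simp [hM]
    rw [h2, Nat.add_zero]
    apply List.countP_congr
    intro j hj
    have : j < M := List.mem_range.mp hj
    simp [this]

theorem countP_shift (a b : List Char) (off : Nat) (hoff : off ≤ a.length) :
    List.countP (fun i => decide (off ≤ i ∧ i - off < b.length
        ∧ b.getD (i - off) ' ' = a.getD i ' ')) (List.range a.length)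
      = pvMC (a.drop off) b := by
  have hsplit : a.length = off + (a.length - off) := by omega
  rw [hsplit, List.range_add, List.countP_append, List.countP_map]
  have h1 : List.countP (fun i => decide (off ≤ i ∧ i - off < b.length
      ∧ b.getD (i - off) ' ' = a.getD i ' ')) (List.range off) = 0 := by
    apply List.countP_eq_zero.mpr
    intro j hj
    have hj' : j < off := List.mem_range.mp hj
    simp only [decide_eq_true_eq]
    rintro ⟨h, -⟩
    omega
  rw [h1, Nat.zero_add]
  have h2 : (fun i => decide (off ≤ i ∧ i - off < b.length
      ∧ b.getD (i - off) ' ' = a.getD i ' ')) ∘ (fun x => off + x)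
      = fun j => decide (j < b.length) && decide (b.getD j ' ' = a.getD (off + j) ' ') := by
    funext j
    have hc : off + j - off = j := by omega
    simp [Function.comp_apply, hc]
  rw [h2, countP_range_and_lt]
  rw [pvMC_countP (a.drop off) b ' ']
  have hdl : (a.drop off).length = a.length - off := by simp
  rw [hdl]
  apply List.countP_congr
  intro j hj
  have hjlt : j < min (a.length - off) b.length := List.mem_range.mp hj
  have hget : (a.drop off).getD j ' ' = a.getD (off + j) ' ' := by
    rw [List.getD_eq_getElem?_getD, List.getD_eq_getElem?_getD, List.getElem?_drop]
  rw [hget]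

-- the filled matches array holds, at each offset, the aligned-match count of A's suffix vs B
theorem matches_getD (a b : List Char) (off : Nat) (hoff : off < a.length) :
    (pvMatches a b).getD off 0 = (pvMC (a.drop off) b : Int) := by
  unfold pvMatches
  obtain ⟨_, hk⟩ := pvMatches_fold b (PySem.List.enumerate a) (List.replicate a.length 0)
  rw [hk off (by simpa using hoff)]
  rw [List.getD_eq_getElem?_getD]
  simp only [List.getElem?_replicate]
  rw [if_pos hoff]
  simp only [Option.getD_some, zero_add]
  rw [PySem.List.enumerate_eq_map_pyRange a ' ', List.map_map]
  have hstep1 : ((PySem.List.pyRange 0 (PySem.List.len a) 1).map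
      ((fun p : Int × Char => (((pvPositions b).getD p.2 []).count (p.1 - (off : Int)) : Int))
        ∘ (fun j => (j, PySem.List.pyGetD a j ' ')))).sum
      = ((PySem.List.pyRange 0 (PySem.List.len a) 1).map
          (fun j => if (0 ≤ j - (off : Int) ∧ j - (off : Int) < (b.length : Int)
              ∧ PySem.List.pyGetD b (j - (off : Int)) ' ' = PySem.List.pyGetD a j ' ')
            then (1 : Int) else 0)).sum := by
    congr 1
    apply List.map_congr_left
    intro j _
    simp only [Function.comp]
    rw [posB_count]
    split_ifs <;> simp
  rw [hstep1]
  have hstep2 : ((PySem.List.pyRange 0 (PySem.List.len a) 1).map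
      (fun j => if (0 ≤ j - (off : Int) ∧ j - (off : Int) < (b.length : Int)
          ∧ PySem.List.pyGetD b (j - (off : Int)) ' ' = PySem.List.pyGetD a j ' ')
        then (1 : Int) else 0)).sum
      = (List.countP (fun j => decide (0 ≤ j - (off : Int) ∧ j - (off : Int) < (b.length : Int)
          ∧ PySem.List.pyGetD b (j - (off : Int)) ' ' = PySem.List.pyGetD a j ' '))
          (PySem.List.pyRange 0 (PySem.List.len a) 1) : Int) := by
    rw [← PySem.List.sum_map_ite_one_zero]
    congr 1
    apply List.map_congr_left
    intro j _
    by_cases h : (0 ≤ j - (off : Int) ∧ j - (off : Int) < (b.length : Int)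
        ∧ PySem.List.pyGetD b (j - (off : Int)) ' ' = PySem.List.pyGetD a j ' ')
    · simp [h]
    · rw [if_neg h, if_neg (by simp only [decide_eq_true_eq]; exact h)]
  rw [hstep2]
  have hlen : PySem.List.len a = ((a.length : Nat) : Int) := by simp [PySem.List.len]
  rw [hlen, PySem.List.pyRange_zero_natCast, List.countP_map]
  have hstep3 : List.countP ((fun j => decide (0 ≤ j - (off : Int) ∧ j - (off : Int) < (b.length : Int)
      ∧ PySem.List.pyGetD b (j - (off : Int)) ' ' = PySem.List.pyGetD a j ' ')) ∘ (fun k : Nat => (k : Int)))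
      (List.range a.length)
      = List.countP (fun i => decide (off ≤ i ∧ i - off < b.length
          ∧ b.getD (i - off) ' ' = a.getD i ' ')) (List.range a.length) := by
    apply List.countP_congr
    intro i _
    simp only [Function.comp_apply]
    by_cases hge : off ≤ i
    · have hcast : (i : Int) - (off : Int) = ((i - off : Nat) : Int) := by omega
      rw [hcast, PySem.List.pyGetD_natCast, PySem.List.pyGetD_natCast]
      simp only [decide_eq_true_eq]
      constructor
      · rintro ⟨_, h1, h2⟩; exact ⟨hge, by exact_mod_cast h1, h2⟩
      · rintro ⟨_, h1, h2⟩; exact ⟨by omega, by exact_mod_cast h1, h2⟩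
    · simp only [decide_eq_true_eq]
      constructor
      · rintro ⟨h0, _⟩; exact absurd (by omega : off ≤ i) hge
      · rintro ⟨h0, _⟩; exact absurd h0 hge
  rw [hstep3, countP_shift a b off (le_of_lt hoff)]

-- the scans agree step by step: at each offset the two acceptance tests coincide
theorem pvScan_eq (a b : List Char) (f : Int) :
    ∀ cnt i, a.length - i = cnt → i ≤ a.length →
      pvALoop a b f (PySem.List.pyRange (i : Int) (a.length : Int) 1)
        = pvBScan (a.length : Int) (b.length : Int) f (pvMatches a b)
            (PySem.List.pyRange (i : Int) (a.length : Int) 1) := by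
  intro cnt
  induction cnt with
  | zero =>
    intro i hn hi
    have hi' : i = a.length := by omega
    subst hi'
    rw [PySem.List.pyRange_one_eq_nil (le_refl _)]
    simp [pvALoop, pvBScan]
  | succ m ih =>
    intro i hn hi
    have hlt : i < a.length := by omega
    rw [PySem.List.pyRange_one_cons (by exact_mod_cast hlt)]
    have htmp : PySem.List.slice a (some (i : Int)) (some (a.length : Int)) = a.drop i := by
      rw [PySem.List.slice_natCast]
      have : (a.drop i).length = a.length - i := by simp
      rw [← this, List.take_length]
    have hcast : ((i : Int) + 1) = ((i + 1 : Nat) : Int) := by omega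
    have hdl : (a.drop i).length = a.length - i := by simp
    have hmm := pvMM_add_pvMC (a.drop i) b
    rw [hdl] at hmm
    have hmt := matches_getD a b i hlt
    have htn : ((i : Int)).toNat = i := by omega
    have hcond : (pvGetEditDistanze b (a.drop i) ≤ f)
        ↔ (min ((a.length : Int) - (i : Int)) (b.length : Int)
            - (pvMatches a b).getD ((i : Int)).toNat 0 ≤ f) := by
      rw [pvEdit_eq_mm, htn, hmt]
      have h1 : min ((a.length : Int) - (i : Int)) (b.length : Int)
          = ((min (a.length - i) b.length : Nat) : Int) := by
        rw [Nat.cast_min]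
        omega
      rw [h1]
      omega
    rw [pvALoop, pvBScan, htmp]
    by_cases hc : pvGetEditDistanze b (a.drop i) ≤ f
    · rw [if_pos hc, if_pos (hcond.mp hc), hdl]
      omega
    · rw [if_neg hc, if_neg (fun h => hc (hcond.mpr h)), hcast, ih (i + 1) (by omega) (by omega)]

-- ===== VERDICT (by name: the statement is the Claim_ definition above) =====
theorem checkSequenceSubst_py_spec : Claim_equal_checkSequenceSubst_py := by
  intro sA sB _
  unfold Spec_checkSequenceSubst_py checkSequenceSubst_py checkSequenceSubst_py_alt pvGetMaxErrors
  exact pvScan_eq sA.toList sB.toList _ (sA.toList.length) 0 (by omega) (by omega)
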